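-- pv_equiv track=rewrite | github.com/Indira2005/grpa-opee | oppe2/mock5.1.py | unique_vowels
-- ===== SOURCE A (Python) =====
-- def unique_vowels(s: str) -> set:
--     '''
--     Given a string, return a set of unique vowels present in the string.
--
--     Arguments:
--     s: str - the input string
--
--     Return:
--     set - a set of unique vowels present in the string
--
--     Example:
--     >>> unique_vowels('aeiou')
--     {'u', 'i', 'o', 'e', 'a'}
--     '''
--     l = []
--     vowels = {"a", "e", "i", "o", "u","A","E","I","O","U"}
--     for ch in s:
--         if ch in vowels:
--             l.append(ch)
--     fset = {}
--     fset = set(l)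
--     return fset
-- ===== SOURCE B (Python) =====
-- def unique_vowels(s: str) -> set:
--     vowels = {"a", "e", "i", "o", "u", "A", "E", "I", "O", "U"}
--     if len(s) <= 1:
--         return {s} if s in vowels else set()
--     m = len(s) // 2
--     return unique_vowels(s[:m]) | unique_vowels(s[m:])
-- ===== Notes on version B (the rewrite author's own statement) =====
-- stated objective: alternative
-- what changed: Replaces A's linear scan-and-append into an accumulator list followed by set() with a divide-and-conquer recursion: split the string at its midpoint, recurse on both halves, and combine with set union; the base case decides a single character directly.
import Mathlib
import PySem

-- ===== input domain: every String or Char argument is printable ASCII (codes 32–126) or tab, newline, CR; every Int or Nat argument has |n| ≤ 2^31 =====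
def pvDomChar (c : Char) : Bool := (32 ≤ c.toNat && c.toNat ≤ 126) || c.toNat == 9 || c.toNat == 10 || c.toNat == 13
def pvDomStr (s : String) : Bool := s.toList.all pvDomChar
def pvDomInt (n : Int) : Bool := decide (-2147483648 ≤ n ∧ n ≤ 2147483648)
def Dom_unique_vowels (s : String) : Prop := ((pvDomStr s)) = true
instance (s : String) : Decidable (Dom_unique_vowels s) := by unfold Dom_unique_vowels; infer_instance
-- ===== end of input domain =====

-- B replaces A's scan-and-append accumulator loop with a midpoint divide-and-conquer: recurse on the two halves and combine with set union (alternative decomposition, similar cost).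

-- ===== PORT A =====
def unique_vowels (s : String) : List String :=
  let vowels : PySem.Set String :=
    PySem.Set.ofList ["a", "e", "i", "o", "u", "A", "E", "I", "O", "U"]
  let l : List String :=
    s.toList.foldl (fun l ch =>
      if vowels.contains (String.ofList [ch]) then l ++ [String.ofList [ch]] else l) []
  PySem.Set.ofList l

-- ===== PORT B =====
def pvVowelsB : PySem.Set String :=
  PySem.Set.ofList ["a", "e", "i", "o", "u", "A", "E", "I", "O", "U"]

-- recursion over the character list; s[:m]/s[m:] with 0 ≤ m ≤ len(s) are exactly take/drop
def uvGo (cs : List Char) : PySem.Set String :=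
  if cs.length ≤ 1 then
    match cs with
    | [] => PySem.Set.empty
    | c :: _ =>
        if pvVowelsB.contains (String.ofList [c]) then PySem.Set.ofList [String.ofList [c]]
        else PySem.Set.empty
  else
    PySem.Set.union (uvGo (cs.take (cs.length / 2))) (uvGo (cs.drop (cs.length / 2)))
termination_by cs.length
decreasing_by
  · simp only [List.length_take]; omega
  · simp only [List.length_drop]; omega

def unique_vowels_alt (s : String) : List String :=
  uvGo s.toList

-- ===== PRECONDITION & SPEC =====
def Spec_unique_vowels (s : String) (out : List String) : Prop := out = unique_vowels_alt s
instance (s : String) (out : List String) : Decidable (Spec_unique_vowels s out) := by unfold Spec_unique_vowels; infer_instance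

-- ===== CLAIM =====
def Claim_equal_unique_vowels : Prop := ∀ (s : String), Dom_unique_vowels s → Spec_unique_vowels s (unique_vowels s)

-- ===== LEMMAS AND PROOFS =====

theorem pv_union_eq_update {α : Type} [BEq α] (s t : PySem.Set α) :
    PySem.Set.union s t = PySem.Set.update s t := rfl

theorem pv_update_ofList {α : Type} [BEq α] [LawfulBEq α] (s : PySem.Set α) (ys : List α) :
    PySem.Set.update s (PySem.Set.ofList ys) = PySem.Set.update s ys := by
  rw [PySem.Set.update_eq_append_filter, PySem.Set.update_eq_append_filter,
    PySem.Set.ofList_ofList]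

-- uvGo computes set(map single (filter vowel cs)) — by strong induction on the length
theorem uvGo_eq (cs : List Char) :
    uvGo cs =
      PySem.Set.ofList
        ((cs.filter (fun ch => pvVowelsB.contains (String.ofList [ch]))).map
          (fun ch => String.ofList [ch])) := by
  by_cases h : cs.length ≤ 1
  · match cs with
    | [] => simp [uvGo]
    | [c] =>
      by_cases hc : String.ofList [c] ∈ pvVowelsB
      · simp [uvGo, hc]
      · simp [uvGo, hc]
  · rw [uvGo.eq_def, if_neg h]
    rw [uvGo_eq (cs.take (cs.length / 2)), uvGo_eq (cs.drop (cs.length / 2))]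
    rw [pv_union_eq_update, pv_update_ofList, ← PySem.Set.ofList_append,
      ← List.map_append, ← List.filter_append, List.take_append_drop]
termination_by cs.length
decreasing_by
  · simp only [List.length_take]; omega
  · simp only [List.length_drop]; omega

-- ===== VERDICT =====
theorem unique_vowels_spec : Claim_equal_unique_vowels := by
  intro s _
  show unique_vowels s = unique_vowels_alt s
  simp only [unique_vowels, unique_vowels_alt]
  rw [PySem.List.foldl_append_if]
  rw [uvGo_eq]
  simp only [pvVowelsB, List.nil_append]
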